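-- pv_equiv track=rewrite | github.com/AngelosKoz/MSc_Scripts-Notes | Python_MSc/Set_21-40.py | f30
-- ===== SOURCE A (Python) =====
-- def f30(x):
--     topstar = 0
--     bot = 2
--     botstar = 1
--     pattern = ""
--     blank = ""
--     for i in range(1, x + 1):
--         for j in range (1, (x - i) + 1):
--             pattern = " ".join([pattern, blank])
--         while topstar != (( 2 * i ) - 1):
--             pattern = "*".join([pattern, blank])
--             topstar += 1
--         topstar = 0
--         pattern = "\n".join([pattern, blank])
--     for k in range(1, x):
--         for l in range (1, bot):
--             pattern = " ".join([pattern, blank])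
--         bot += 1
--         while botstar <= (2 * (x - k) - 1):
--             pattern = "*".join([pattern, blank])
--             botstar += 1
--         botstar = 1
--         pattern = "\n".join([pattern, blank])
--         if botstar > (2 * (x - k) - 1):
--             break
--     return pattern
-- ===== SOURCE B (Python) =====
-- def f30(x):
--     top = [" " * (x - i) + "*" * (2 * i - 1) for i in range(1, x + 1)]
--     lines = top + list(reversed(top[:-1]))
--     return "".join(line + "\n" for line in lines)
-- ===== Notes on version B (the rewrite author's own statement) =====
-- stated objective: faster
-- what changed: B builds each row once with string repetition and mirrors the top half (top + reversed(top[:-1])) joined in one pass, instead of A's character-by-character join-appends, a second loop recomputing every bottom row, and a dead break guard.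
import Mathlib
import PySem

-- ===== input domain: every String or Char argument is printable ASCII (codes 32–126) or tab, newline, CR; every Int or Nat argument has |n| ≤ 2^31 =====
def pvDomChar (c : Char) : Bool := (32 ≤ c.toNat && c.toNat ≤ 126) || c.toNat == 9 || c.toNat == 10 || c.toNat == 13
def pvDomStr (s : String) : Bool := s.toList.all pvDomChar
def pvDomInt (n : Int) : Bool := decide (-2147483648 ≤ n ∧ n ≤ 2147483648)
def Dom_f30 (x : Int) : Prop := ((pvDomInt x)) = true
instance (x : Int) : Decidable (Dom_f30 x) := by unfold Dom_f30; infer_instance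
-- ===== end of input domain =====

-- B builds each row once and mirrors the top half, replacing A's per-character
-- join-appends and its second recomputing loop (objective: faster).

-- ===== PORT A =====
-- `while topstar != 2*i - 1` counting topstar up from 0: on every state Python
-- reaches, topstar ≤ target, so `<` is the same test; it makes termination evident.
def f30_starsTop (target ts : Int) (p : List Char) : List Char :=
  if ts < target then f30_starsTop target (ts + 1) (p ++ ['*']) else p
  termination_by (target - ts).toNat
  decreasing_by omega

-- `while botstar <= 2*(x-k) - 1` counting botstar up from 1.
def f30_starsBot (target bs : Int) (p : List Char) : List Char :=
  if bs ≤ target then f30_starsBot target (bs + 1) (p ++ ['*']) else p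
  termination_by (target - bs + 1).toNat
  decreasing_by omega

-- `" ".join([pattern, ""])` etc. append exactly one separator character to pattern.
def f30 (x : Int) : String :=
  let top := (PySem.List.pyRange 1 (x + 1) 1).foldl (fun p i =>
      let p := (PySem.List.pyRange 1 ((x - i) + 1) 1).foldl (fun p _ => p ++ [' ']) p
      let p := f30_starsTop (2 * i - 1) 0 p
      p ++ ['\n']) []
  -- bottom loop: state (pattern, bot, broke); `broke` models the trailing break.
  let st := (PySem.List.pyRange 1 x 1).foldl (fun (st : List Char × Int × Bool) k =>
      match st with
      | (p, bot, broke) =>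
        if broke then (p, bot, broke) else
        let p := (PySem.List.pyRange 1 bot 1).foldl (fun p _ => p ++ [' ']) p
        let bot := bot + 1
        let p := f30_starsBot (2 * (x - k) - 1) 1 p
        let p := p ++ ['\n']
        ((p, bot, decide ((1 : Int) > 2 * (x - k) - 1)))) (top, 2, false)
  String.ofList st.1

-- ===== PORT B =====
def f30_alt (x : Int) : String :=
  let top := (PySem.List.pyRange 1 (x + 1) 1).map (fun i =>
      List.replicate (x - i).toNat ' ' ++ List.replicate (2 * i - 1).toNat '*')
  let lines := top ++ top.dropLast.reverse
  String.ofList (lines.flatMap (fun line => line ++ ['\n']))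

-- ===== PRECONDITION & SPEC =====
def Spec_f30 (x : Int) (out : String) : Prop := out = f30_alt x
instance (x : Int) (out : String) : Decidable (Spec_f30 x out) := by unfold Spec_f30; infer_instance

-- ===== CLAIM (what is proved, stated in full; the proofs are below) =====
def Claim_equal_f30 : Prop := ∀ (x : Int), Dom_f30 x → Spec_f30 x (f30 x)

-- ===== LEMMAS AND PROOFS =====

theorem starsTop_eq (target : Int) : ∀ (ts : Int) (p : List Char),
    f30_starsTop target ts p = p ++ List.replicate (target - ts).toNat '*' := by
  intro ts p
  induction' h : (target - ts).toNat using Nat.strong_induction_on with n ih generalizing ts p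
  rw [f30_starsTop]
  split_ifs with hlt
  · rw [ih (target - (ts + 1)).toNat (by omega) (ts + 1) _ rfl]
    have : (target - ts).toNat = (target - (ts + 1)).toNat + 1 := by omega
    simp [h ▸ this, List.replicate_succ, List.append_assoc]
  · have h0 : n = 0 := by omega
    subst h0; simp

theorem starsBot_eq (target : Int) : ∀ (bs : Int) (p : List Char),
    f30_starsBot target bs p = p ++ List.replicate (target - bs + 1).toNat '*' := by
  intro bs p
  induction' h : (target - bs + 1).toNat using Nat.strong_induction_on with n ih generalizing bs p
  rw [f30_starsBot]
  split_ifs with hle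
  · rw [ih (target - (bs + 1) + 1).toNat (by omega) (bs + 1) _ rfl]
    have : (target - bs + 1).toNat = (target - (bs + 1) + 1).toNat + 1 := by omega
    simp [h ▸ this, List.replicate_succ, List.append_assoc]
  · have h0 : n = 0 := by omega
    subst h0; simp

theorem spaces_eq (l : List Int) : ∀ (p : List Char),
    l.foldl (fun p _ => p ++ [' ']) p = p ++ List.replicate l.length ' ' := by
  induction l with
  | nil => simp
  | cons a t ih => intro p; simp [List.foldl_cons, ih, List.replicate_succ, List.append_assoc]

def rowT (x i : Int) : List Char :=
  List.replicate (x - i).toNat ' ' ++ List.replicate (2 * i - 1).toNat '*'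

theorem top_fold (x : Int) (l : List Int) : ∀ (p : List Char),
    l.foldl (fun p i =>
      let p := (PySem.List.pyRange 1 ((x - i) + 1) 1).foldl (fun p _ => p ++ [' ']) p
      let p := f30_starsTop (2 * i - 1) 0 p
      p ++ ['\n']) p
    = p ++ l.flatMap (fun i => rowT x i ++ ['\n']) := by
  induction l with
  | nil => simp
  | cons a t ih =>
    intro p
    simp only [List.foldl_cons, List.flatMap_cons]
    rw [ih, spaces_eq, starsTop_eq]
    simp [rowT, PySem.List.length_pyRange_one, List.append_assoc]

def rowB (x k : Int) : List Char :=
  List.replicate k.toNat ' ' ++ List.replicate (2 * (x - k) - 1).toNat '*'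

theorem bot_fold (x : Int) : ∀ (a : Int) (p : List Char), 1 ≤ a →
    ((PySem.List.pyRange a x 1).foldl (fun (st : List Char × Int × Bool) k =>
      match st with
      | (p, bot, broke) =>
        if broke then (p, bot, broke) else
        let p := (PySem.List.pyRange 1 bot 1).foldl (fun p _ => p ++ [' ']) p
        let bot := bot + 1
        let p := f30_starsBot (2 * (x - k) - 1) 1 p
        let p := p ++ ['\n']
        ((p, bot, decide ((1 : Int) > 2 * (x - k) - 1)))) (p, a + 1, false)).1
    = p ++ (PySem.List.pyRange a x 1).flatMap (fun k => rowB x k ++ ['\n']) := by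
  intro a p ha
  induction' h : (x - a).toNat using Nat.strong_induction_on with n ih generalizing a p
  by_cases hax : a < x
  · rw [PySem.List.pyRange_one_cons hax]
    simp only [List.foldl_cons, List.flatMap_cons, if_neg Bool.false_ne_true]
    rw [spaces_eq, starsBot_eq]
    have hd : decide ((1 : Int) > 2 * (x - a) - 1) = false := by
      simp; omega
    rw [hd, ih (x - (a + 1)).toNat (by omega) (a + 1) _ (by omega) rfl]
    simp [rowB, PySem.List.length_pyRange_one, List.append_assoc]
  · rw [PySem.List.pyRange_one_eq_nil (by omega)]
    simp

theorem reverse_pyRange (x : Int) :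
    (PySem.List.pyRange 1 x 1).reverse = (PySem.List.pyRange 1 x 1).map (fun k => x - k) := by
  rw [PySem.List.pyRange_one, ← List.map_reverse, List.range_eq_range', List.reverse_range']
  simp only [List.map_map, ← List.range_eq_range']
  apply List.map_congr_left
  intro k hk
  simp only [List.mem_range] at hk
  simp only [Function.comp]
  omega

theorem dropLast_pyRange (x : Int) :
    (PySem.List.pyRange 1 (x + 1) 1).dropLast = PySem.List.pyRange 1 x 1 := by
  by_cases hx : 1 ≤ x
  · rw [PySem.List.pyRange_one_succ_right hx, List.dropLast_concat]
  · rw [PySem.List.pyRange_one_eq_nil (by omega), PySem.List.pyRange_one_eq_nil (by omega)]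
    rfl

theorem f30_eq (x : Int) : f30 x = f30_alt x := by
  simp only [f30, f30_alt]
  rw [top_fold]
  have hb := bot_fold x 1 ((PySem.List.pyRange 1 (x + 1) 1).flatMap fun i => rowT x i ++ ['\n']) le_rfl
  rw [show (1 : Int) + 1 = 2 by norm_num] at hb
  rw [List.nil_append, hb]
  congr 1
  rw [List.flatMap_append]
  congr 1
  · rw [List.flatMap_map]
    simp [rowT, List.append_assoc]
  · rw [← List.map_dropLast, dropLast_pyRange, ← List.map_reverse, reverse_pyRange,
      List.map_map, List.flatMap_map]
    apply List.flatMap_congr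
    intro k hk
    simp only [Function.comp, rowB, show x - (x - k) = k by ring]
-- ===== VERDICT (by name: the statement is the Claim_ definition above) =====
theorem f30_spec : Claim_equal_f30 := by
  intro x _
  unfold Spec_f30
  exact f30_eq x
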